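-- pv_equiv track=rewrite | github.com/Kawser-nerd/CLCDSA | Source Codes/CodeJamData/17/22/1.py | solve
-- ===== SOURCE A (Python) =====
-- def solve(r,y,b):
--     res = [0]*(r+y+b)
--     if (r+y+b) % 2 == 0:
--         if y == r+b:
--             for i in range(y):
--                 res[2*i] = 2
--             for i in range(r):
--                 res[2*i+1] = 1
--             for i in range(r+y+b):
--                 if res[i] == 0:
--                     res[i] = 3
--         else:
--             for i in range(r):
--                 res[2*i] = 1
--             for i in range(b):
--                 res[-2*i-1] = 3
--             for i in range(r+y+b):
--                 if res[i] == 0: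
--                     res[i] = 2
--     elif (r+y+b) % 2 == 1:
--         for i in range(r):
--             res[2*i+1] = 1
--         for i in range(b):
--             res[-2*i-1] = 3
--         for i in range(r+y+b):
--             if res[i] == 0:
--                 res[i] = 2
--     return res
-- ===== SOURCE B (Python) =====
-- def solve(r, y, b):
--     # Single forward pass: each position's value is decided from its parity and
--     # the branch's count boundaries, instead of scatter-writing then zero-filling.
--     n = r + y + b
--     m = max(n, 0)
--     if n % 2 == 0 and y == r + b:
--         return [2 if j % 2 == 0 else (1 if j < 2 * r else 3) for j in range(m)]
--     if n % 2 == 0: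
--         return [(1 if j < 2 * r - 1 else 2) if j % 2 == 0
--                 else (3 if j >= m - 2 * b + 1 else 2) for j in range(m)]
--     return [(1 if j < 2 * r else 2) if j % 2 == 1
--             else (3 if j >= m - 2 * b + 1 else 2) for j in range(m)]
-- ===== Notes on version B (the rewrite author's own statement) =====
-- stated objective: alternative
-- what changed: B builds each branch's output left-to-right in one pass, deciding every position's color from its index parity and the r/b count boundaries, instead of A's preallocated list with three scatter-write loops (including negative-index tails) followed by a zero-fill pass.
import Mathlib
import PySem

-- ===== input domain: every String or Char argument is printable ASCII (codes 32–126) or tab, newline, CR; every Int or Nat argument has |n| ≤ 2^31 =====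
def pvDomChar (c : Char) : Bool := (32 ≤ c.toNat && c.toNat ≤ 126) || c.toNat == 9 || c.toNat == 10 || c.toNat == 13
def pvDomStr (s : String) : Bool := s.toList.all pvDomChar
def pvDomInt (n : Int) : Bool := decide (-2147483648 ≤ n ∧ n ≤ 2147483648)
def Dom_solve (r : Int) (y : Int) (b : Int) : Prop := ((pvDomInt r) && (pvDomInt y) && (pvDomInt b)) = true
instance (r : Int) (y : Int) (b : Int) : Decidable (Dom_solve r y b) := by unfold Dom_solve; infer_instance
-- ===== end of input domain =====

-- B builds each branch's answer by one forward pass deciding every position from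
-- its parity and the count boundaries, instead of A's scatter-writes plus zero-fill.

-- ===== PORT A =====
-- literal port of A: [0]*(r+y+b) is replicate (toNat clamps exactly as Python's `*` on a
-- negative count), each `res[idx] = v` is pySetD (in range on every input Pre_ admits),
-- and the zero-fill pass reads with pyGetD.
def solve (r : Int) (y : Int) (b : Int) : List Int :=
  let n := r + y + b
  let res0 := List.replicate n.toNat (0 : Int)
  if PySem.Int.mod n 2 = 0 then
    if y = r + b then
      let res1 := (PySem.List.pyRange 0 y 1).foldl (fun res i => PySem.List.pySetD res (2*i) 2) res0
      let res2 := (PySem.List.pyRange 0 r 1).foldl (fun res i => PySem.List.pySetD res (2*i+1) 1) res1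
      (PySem.List.pyRange 0 n 1).foldl (fun res i => if PySem.List.pyGetD res i 0 = 0 then PySem.List.pySetD res i 3 else res) res2
    else
      let res1 := (PySem.List.pyRange 0 r 1).foldl (fun res i => PySem.List.pySetD res (2*i) 1) res0
      let res2 := (PySem.List.pyRange 0 b 1).foldl (fun res i => PySem.List.pySetD res (-2*i-1) 3) res1
      (PySem.List.pyRange 0 n 1).foldl (fun res i => if PySem.List.pyGetD res i 0 = 0 then PySem.List.pySetD res i 2 else res) res2
  else if PySem.Int.mod n 2 = 1 then
      let res1 := (PySem.List.pyRange 0 r 1).foldl (fun res i => PySem.List.pySetD res (2*i+1) 1) res0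
      let res2 := (PySem.List.pyRange 0 b 1).foldl (fun res i => PySem.List.pySetD res (-2*i-1) 3) res1
      (PySem.List.pyRange 0 n 1).foldl (fun res i => if PySem.List.pyGetD res i 0 = 0 then PySem.List.pySetD res i 2 else res) res2
  else res0

-- ===== PORT B =====
def solve_alt (r : Int) (y : Int) (b : Int) : List Int :=
  let n := r + y + b
  let m := max n 0
  if PySem.Int.mod n 2 = 0 ∧ y = r + b then
    (PySem.List.pyRange 0 m 1).map (fun j =>
      if PySem.Int.mod j 2 = 0 then 2 else if j < 2*r then 1 else 3)
  else if PySem.Int.mod n 2 = 0 then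
    (PySem.List.pyRange 0 m 1).map (fun j =>
      if PySem.Int.mod j 2 = 0 then (if j < 2*r - 1 then (1:Int) else 2)
      else (if m - 2*b + 1 ≤ j then 3 else 2))
  else
    (PySem.List.pyRange 0 m 1).map (fun j =>
      if PySem.Int.mod j 2 = 1 then (if j < 2*r then (1:Int) else 2)
      else (if m - 2*b + 1 ≤ j then 3 else 2))

-- ===== PRECONDITION & SPEC =====
-- Pre_solve is exactly the set of inputs where A's scatter-writes stay in range
-- (outside it A raises IndexError: an index 2*i / 2*i+1 / -2*i-1 beyond the list).
def Pre_solve (r : Int) (y : Int) (b : Int) : Prop :=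
  if PySem.Int.mod (r+y+b) 2 = 0 ∧ y = r + b then (0 ≤ y ∧ r ≤ y) ∨ (y < 0 ∧ r ≤ 0)
  else (r ≤ 0 ∨ 2*r ≤ max (r+y+b) 0) ∧ (b ≤ 0 ∨ 2*b - 1 ≤ max (r+y+b) 0)
instance (r : Int) (y : Int) (b : Int) : Decidable (Pre_solve r y b) := by unfold Pre_solve; infer_instance
def pvWitness_solve : Int × Int × Int := (1, 2, 1)

def Spec_solve (r : Int) (y : Int) (b : Int) (out : List Int) : Prop := out = solve_alt r y b
instance (r : Int) (y : Int) (b : Int) (out : List Int) : Decidable (Spec_solve r y b out) := by unfold Spec_solve; infer_instance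

-- ===== CLAIM (what is proved, stated in full; the proofs are below) =====
def Claim_equal_solve : Prop := ∀ (r : Int) (y : Int) (b : Int), Dom_solve r y b → Pre_solve r y b → Spec_solve r y b (solve r y b)

-- ===== LEMMAS AND PROOFS =====

lemma foldl_pyRange_eq (c : Int) (f : List Int → Int → List Int) (xs : List Int) :
    (PySem.List.pyRange 0 c 1).foldl f xs
      = (List.range c.toNat).foldl (fun res (k : Nat) => f res (k : Int)) xs := by
  have h : (c - 0).toNat = c.toNat := by norm_num
  rw [PySem.List.pyRange_one, List.foldl_map, h]
  simp only [zero_add]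

lemma pySetD_neg (xs : List Int) (i v : Int) (h1 : -xs.length ≤ i) (h2 : i < 0) :
    PySem.List.pySetD xs i v = xs.set (xs.length + i).toNat v := by
  simp only [PySem.List.pySetD, PySem.List.pySet?, PySem.List.pyIdx?, if_neg (not_le.2 h2), if_pos h1]
  simp only [Option.map_some, Option.getD_some]
  congr 1
  omega

lemma getD_set (xs : List Int) (n j : Nat) (v d : Int) (hj : j < xs.length) :
    (xs.set n v).getD j d = if n = j then v else xs.getD j d := by
  rcases eq_or_ne n j with rfl | h
  · simp [List.getD_eq_getElem?_getD, hj]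
  · simp [List.getD_eq_getElem?_getD, List.getElem?_set_ne h, h]

lemma foldl_length {β : Type} (l : List β) (f : List Int → β → List Int)
    (h : ∀ res x, (f res x).length = res.length) (xs : List Int) :
    (l.foldl f xs).length = xs.length := by
  induction l generalizing xs with
  | nil => rfl
  | cons a t ih => rw [List.foldl_cons, ih, h]

lemma loop_even_getD (m : Nat) (xs : List Int) (v d : Int) (j : Nat) (hj : j < xs.length) :
    ((List.range m).foldl (fun res (k : Nat) => res.set (2*k) v) xs).getD j d
      = if j % 2 = 0 ∧ j < 2*m then v else xs.getD j d := by
  induction m with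
  | zero => simp
  | succ m ih =>
    rw [List.range_succ, List.foldl_append, List.foldl_cons, List.foldl_nil]
    rw [getD_set _ _ _ _ _ (by rw [foldl_length _ _ (fun res x => by simp)]; exact hj)]
    rw [ih]
    split_ifs <;> first | rfl | omega

lemma loop_odd_getD (m : Nat) (xs : List Int) (v d : Int) (j : Nat) (hj : j < xs.length) :
    ((List.range m).foldl (fun res (k : Nat) => res.set (2*k+1) v) xs).getD j d
      = if j % 2 = 1 ∧ j < 2*m+1 then v else xs.getD j d := by
  induction m with
  | zero => simp; omega
  | succ m ih =>
    rw [List.range_succ, List.foldl_append, List.foldl_cons, List.foldl_nil]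
    rw [getD_set _ _ _ _ _ (by rw [foldl_length _ _ (fun res x => by simp)]; exact hj)]
    rw [ih]
    split_ifs <;> first | rfl | omega

lemma loop_back_getD (m : Nat) (xs : List Int) (v d : Int) (j : Nat) (hj : j < xs.length)
    (hm : 2*m ≤ xs.length + 1) :
    ((List.range m).foldl (fun res (k : Nat) => PySem.List.pySetD res (-2*(k:Int)-1) v) xs).getD j d
      = if (xs.length - 1 - j) % 2 = 0 ∧ xs.length ≤ j + 2*m then v else xs.getD j d := by
  induction m with
  | zero => simp; omega
  | succ m ih =>
    rw [List.range_succ, List.foldl_append, List.foldl_cons, List.foldl_nil]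
    have hlen : ((List.range m).foldl (fun res (k : Nat) => PySem.List.pySetD res (-2*(k:Int)-1) v) xs).length = xs.length :=
      foldl_length _ _ (fun res _ => PySem.List.length_pySetD res _ v) xs
    rw [pySetD_neg _ _ _ (by rw [hlen]; omega) (by omega)]
    rw [getD_set _ _ _ _ _ (by rw [foldl_length _ _ (fun res _ => PySem.List.length_pySetD res _ v)]; exact hj)]
    rw [ih (by omega)]
    rw [hlen]
    have hpos : (↑xs.length + (-2*(m:Int)-1)).toNat = xs.length - 2*m - 1 := by omega
    rw [hpos]
    split_ifs <;> first | rfl | omega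

lemma fill_getD (m : Nat) (xs : List Int) (v : Int) (hm : m ≤ xs.length) :
    ∀ (d : Int) (j : Nat), j < xs.length →
    ((List.range m).foldl (fun res (k : Nat) => if PySem.List.pyGetD res (k:Int) 0 = 0 then PySem.List.pySetD res (k:Int) v else res) xs).getD j d
      = if j < m ∧ xs.getD j 0 = 0 then v else xs.getD j d := by
  induction m with
  | zero => intro d j hj; simp
  | succ m ih =>
    intro d j hj
    rw [List.range_succ, List.foldl_append, List.foldl_cons, List.foldl_nil]
    have hlen : ((List.range m).foldl (fun res (k : Nat) => if PySem.List.pyGetD res (k:Int) 0 = 0 then PySem.List.pySetD res (k:Int) v else res) xs).length = xs.length :=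
      foldl_length _ _ (fun res _ => by split <;> simp) xs
    rw [PySem.List.pyGetD_natCast, ih (by omega) 0 m (by omega)]
    have hmm : ¬ (m < m ∧ xs.getD m 0 = 0) := by omega
    rw [if_neg hmm]
    split
    · rename_i h
      rw [PySem.List.pySetD_natCast, getD_set _ _ _ _ _ (by rw [hlen]; exact hj),
        ih (by omega) d j hj]
      by_cases hje : j = m
      · subst hje; simp only [List.getD_eq_getElem?_getD] at h; simp [h]
      · rw [if_neg (fun hh => hje hh.symm)]
        have hiff : (j < m ∧ xs.getD j 0 = 0) ↔ (j < m + 1 ∧ xs.getD j 0 = 0) := by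
          constructor <;> (rintro ⟨a, c⟩; exact ⟨by omega, c⟩)
        rw [if_congr hiff rfl rfl]
    · rename_i h
      rw [ih (by omega) d j hj]
      by_cases hje : j = m
      · subst hje; simp only [List.getD_eq_getElem?_getD] at h; simp [h]
      · have hiff : (j < m ∧ xs.getD j 0 = 0) ↔ (j < m + 1 ∧ xs.getD j 0 = 0) := by
          constructor <;> (rintro ⟨a, c⟩; exact ⟨by omega, c⟩)
        rw [if_congr hiff rfl rfl]



lemma even_fold_cast (c : Nat) (xs : List Int) (v : Int) :
    (List.range c).foldl (fun res (k : Nat) => PySem.List.pySetD res (2*(k:Int)) v) xs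
      = (List.range c).foldl (fun res (k : Nat) => res.set (2*k) v) xs := by
  refine List.foldl_ext _ _ _ (fun a k _ => ?_)
  have h : (2*(k:Int)) = ((2*k : Nat) : Int) := by push_cast; ring
  rw [h, PySem.List.pySetD_natCast]

lemma odd_fold_cast (c : Nat) (xs : List Int) (v : Int) :
    (List.range c).foldl (fun res (k : Nat) => PySem.List.pySetD res (2*(k:Int)+1) v) xs
      = (List.range c).foldl (fun res (k : Nat) => res.set (2*k+1) v) xs := by
  refine List.foldl_ext _ _ _ (fun a k _ => ?_)
  have h : (2*(k:Int)+1) = ((2*k+1 : Nat) : Int) := by push_cast; ring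
  rw [h, PySem.List.pySetD_natCast]

lemma len_even_fold (c : Nat) (xs : List Int) (v : Int) :
    ((List.range c).foldl (fun res (k : Nat) => res.set (2*k) v) xs).length = xs.length :=
  foldl_length _ _ (fun res _ => by simp) xs

lemma len_odd_fold (c : Nat) (xs : List Int) (v : Int) :
    ((List.range c).foldl (fun res (k : Nat) => res.set (2*k+1) v) xs).length = xs.length :=
  foldl_length _ _ (fun res _ => by simp) xs

lemma len_back_fold (c : Nat) (xs : List Int) (v : Int) :
    ((List.range c).foldl (fun res (k : Nat) => PySem.List.pySetD res (-2*(k:Int)-1) v) xs).length = xs.length :=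
  foldl_length _ _ (fun res _ => PySem.List.length_pySetD res _ v) xs

lemma len_fill_fold (c : Nat) (xs : List Int) (v : Int) :
    ((List.range c).foldl (fun res (k : Nat) => if PySem.List.pyGetD res (k:Int) 0 = 0 then PySem.List.pySetD res (k:Int) v else res) xs).length = xs.length :=
  foldl_length _ _ (fun res _ => by split <;> simp) xs

-- ===== VERDICT (by name: the statement is the Claim_ definition above) =====
theorem solve_spec : Claim_equal_solve := by
  intro r y b _ hpre
  unfold Spec_solve
  unfold Pre_solve at hpre
  simp only [solve, solve_alt]
  have h2 : PySem.Int.mod (r+y+b) 2 = (r+y+b) % 2 := PySem.Int.mod_eq_emod_of_pos (by norm_num)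
  by_cases h0 : PySem.Int.mod (r+y+b) 2 = 0
  · by_cases hy : y = r + b
    · rw [if_pos ⟨h0, hy⟩] at hpre
      rw [if_pos h0, if_pos hy, if_pos ⟨h0, hy⟩]
      rcases hpre with ⟨hy0, hr⟩ | ⟨hy0, hr⟩
      · rw [foldl_pyRange_eq, foldl_pyRange_eq, foldl_pyRange_eq, even_fold_cast, odd_fold_cast,
            PySem.List.pyRange_one]
        apply List.ext_getElem
        · rw [len_fill_fold, len_odd_fold, len_even_fold, List.length_replicate,
              List.length_map, List.length_map, List.length_range]
          omega
        · intro j h1 h2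
          have hjL : j < (r+y+b).toNat := by
            rwa [len_fill_fold, len_odd_fold, len_even_fold, List.length_replicate] at h1
          rw [List.getElem_map, List.getElem_map, List.getElem_range]
          rw [← List.getD_eq_getElem _ 0 h1]
          rw [fill_getD _ _ _ (by rw [len_odd_fold, len_even_fold, List.length_replicate]) 0 j
              (by rw [len_odd_fold, len_even_fold, List.length_replicate]; exact hjL)]
          rw [loop_odd_getD _ _ _ _ _ (by rw [len_even_fold, List.length_replicate]; exact hjL)]
          rw [loop_even_getD _ _ _ _ _ (by rw [List.length_replicate]; exact hjL)]
          rw [List.getD_replicate _ hjL]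
          have hmj : PySem.Int.mod ((0:Int) + (j:Nat)) 2 = ((0:Int) + (j:Nat)) % 2 :=
            PySem.Int.mod_eq_emod_of_pos (by norm_num)
          rw [hmj]
          split_ifs <;> first | rfl | omega
      · -- y < 0 : everything is empty
        rw [foldl_pyRange_eq, foldl_pyRange_eq, foldl_pyRange_eq]
        have e1 : (r+y+b).toNat = 0 := by omega
        have e2 : y.toNat = 0 := by omega
        have e3 : r.toNat = 0 := by omega
        have e4 : (max (r+y+b) 0 - 0).toNat = 0 := by omega
        rw [PySem.List.pyRange_one, e1, e2, e3, e4]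
        simp
    · rw [if_neg (fun h => hy h.2)] at hpre
      rw [if_pos h0, if_neg hy, if_neg (fun (h : _ ∧ _) => hy h.2), if_pos h0]
      obtain ⟨hbr, hbb⟩ := hpre
      have hb2 : 2*b.toNat ≤ (r+y+b).toNat + 1 := by rcases hbb with h | h <;> omega
      rw [foldl_pyRange_eq, foldl_pyRange_eq, foldl_pyRange_eq, even_fold_cast,
          PySem.List.pyRange_one]
      apply List.ext_getElem
      · rw [len_fill_fold, len_back_fold, len_even_fold, List.length_replicate,
            List.length_map, List.length_map, List.length_range]
        omega
      · intro j h1 h2'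
        have hjL : j < (r+y+b).toNat := by
          rwa [len_fill_fold, len_back_fold, len_even_fold, List.length_replicate] at h1
        rw [List.getElem_map, List.getElem_map, List.getElem_range,
            ← List.getD_eq_getElem _ 0 h1]
        rw [fill_getD _ _ _ (by rw [len_back_fold, len_even_fold, List.length_replicate]) 0 j
            (by rw [len_back_fold, len_even_fold, List.length_replicate]; exact hjL)]
        rw [loop_back_getD _ _ _ _ _
            (by rw [len_even_fold, List.length_replicate]; exact hjL)
            (by rw [len_even_fold, List.length_replicate]; exact hb2)]
        rw [len_even_fold, List.length_replicate]
        rw [loop_even_getD _ _ _ _ _ (by rw [List.length_replicate]; exact hjL)]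
        rw [List.getD_replicate _ hjL]
        have hmj : PySem.Int.mod ((0:Int) + (j:Nat)) 2 = ((0:Int) + (j:Nat)) % 2 :=
          PySem.Int.mod_eq_emod_of_pos (by norm_num)
        rw [hmj]
        split_ifs <;> first | rfl | omega
  · have h1 : PySem.Int.mod (r+y+b) 2 = 1 := by omega
    rw [if_neg (fun (h : _ ∧ _) => h0 h.1)] at hpre
    rw [if_neg h0, if_pos h1, if_neg (fun (h : _ ∧ _) => h0 h.1), if_neg h0]
    obtain ⟨hbr, hbb⟩ := hpre
    have hb2 : 2*b.toNat ≤ (r+y+b).toNat + 1 := by rcases hbb with h | h <;> omega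
    rw [foldl_pyRange_eq, foldl_pyRange_eq, foldl_pyRange_eq, odd_fold_cast,
        PySem.List.pyRange_one]
    apply List.ext_getElem
    · rw [len_fill_fold, len_back_fold, len_odd_fold, List.length_replicate,
          List.length_map, List.length_map, List.length_range]
      omega
    · intro j h1' h2'
      have hjL : j < (r+y+b).toNat := by
        rwa [len_fill_fold, len_back_fold, len_odd_fold, List.length_replicate] at h1'
      rw [List.getElem_map, List.getElem_map, List.getElem_range,
          ← List.getD_eq_getElem _ 0 h1']
      rw [fill_getD _ _ _ (by rw [len_back_fold, len_odd_fold, List.length_replicate]) 0 j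
          (by rw [len_back_fold, len_odd_fold, List.length_replicate]; exact hjL)]
      rw [loop_back_getD _ _ _ _ _
          (by rw [len_odd_fold, List.length_replicate]; exact hjL)
          (by rw [len_odd_fold, List.length_replicate]; exact hb2)]
      rw [len_odd_fold, List.length_replicate]
      rw [loop_odd_getD _ _ _ _ _ (by rw [List.length_replicate]; exact hjL)]
      rw [List.getD_replicate _ hjL]
      have hmj : PySem.Int.mod ((0:Int) + (j:Nat)) 2 = ((0:Int) + (j:Nat)) % 2 :=
        PySem.Int.mod_eq_emod_of_pos (by norm_num)
      rw [hmj]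
      split_ifs <;> first | rfl | omega
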